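-- pv_equiv track=rewrite | github.com/daad-adventure-writer/DRT | drt.py | cuenta_ocurrencias
-- ===== SOURCE A (Python) =====
-- def cuenta_ocurrencias (cadenas, minAbrev, maxAbrev):
--   ahorros     = {}  # Cuántos bytes en total se ahorrarían por abreviar cada ocurrencia
--   ocurrencias = {}  # Cuántas veces aparece cada combinación de caracteres
--   for cadena in cadenas:
--     longCadena = len (cadena)
--     if longCadena < minAbrev:
--       continue
--     for pos in range (0, (longCadena - minAbrev) + 1):
--       for longAbrev in range (minAbrev, min (maxAbrev, longCadena - pos) + 1):
--         ahorro     = longAbrev - 1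
--         ocurrencia = cadena[pos:pos + longAbrev]
--         if ocurrencia in ocurrencias:
--           ahorros[ocurrencia]     += ahorro
--           ocurrencias[ocurrencia] += 1
--         else:
--           ahorros[ocurrencia]     = 0  # No se ahorra ni desperdicia nada
--           ocurrencias[ocurrencia] = 1
--   return (ahorros, ocurrencias)
-- ===== SOURCE B (Python) =====
-- def cuenta_ocurrencias(cadenas, minAbrev, maxAbrev):
--   # Key order is part of the contract: first appearance, scanning each string by
--   # position and, per position, by growing length.  Collect it once by ordered dedup.
--   orden = list(dict.fromkeys(
--       cadena[pos:pos + lng]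
--       for cadena in cadenas
--       for pos in range(len(cadena) - minAbrev + 1)
--       for lng in range(minAbrev, min(maxAbrev, len(cadena) - pos) + 1)))
--   # Occurrence counts, computed length-major: one sliding-window tally per length.
--   cuentas = {}
--   tope = min(maxAbrev, max(map(len, cadenas), default=0))
--   for lng in range(minAbrev, tope + 1):
--     for cadena in cadenas:
--       for pos in range(len(cadena) - lng + 1):
--         s = cadena[pos:pos + lng]
--         cuentas[s] = cuentas.get(s, 0) + 1
--   # Every occurrence of s saves len(s)-1 bytes except the first, which saves nothing.
--   ahorros     = {s: (cuentas.get(s, 0) - 1) * (len(s) - 1) for s in orden}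
--   ocurrencias = {s: cuentas.get(s, 0) for s in orden}
--   return (ahorros, ocurrencias)
-- ===== Notes on version B (the rewrite author's own statement) =====
-- stated objective: alternative
-- what changed: A tallies two parallel dicts event by event with an in/else branch; B instead stages three passes: an ordered dedup of the substrings fixes the key order, a length-major sliding-window tally builds one occurrence counter, and the savings dict is derived by the closed form (count-1)*(len-1).
-- outside the precondition, e.g. on cuenta_ocurrencias(['', 'a'], -1, -1): A returns ({'': -8}, {'': 5}), B returns ({'': -4}, {'': 5})
import Mathlib
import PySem

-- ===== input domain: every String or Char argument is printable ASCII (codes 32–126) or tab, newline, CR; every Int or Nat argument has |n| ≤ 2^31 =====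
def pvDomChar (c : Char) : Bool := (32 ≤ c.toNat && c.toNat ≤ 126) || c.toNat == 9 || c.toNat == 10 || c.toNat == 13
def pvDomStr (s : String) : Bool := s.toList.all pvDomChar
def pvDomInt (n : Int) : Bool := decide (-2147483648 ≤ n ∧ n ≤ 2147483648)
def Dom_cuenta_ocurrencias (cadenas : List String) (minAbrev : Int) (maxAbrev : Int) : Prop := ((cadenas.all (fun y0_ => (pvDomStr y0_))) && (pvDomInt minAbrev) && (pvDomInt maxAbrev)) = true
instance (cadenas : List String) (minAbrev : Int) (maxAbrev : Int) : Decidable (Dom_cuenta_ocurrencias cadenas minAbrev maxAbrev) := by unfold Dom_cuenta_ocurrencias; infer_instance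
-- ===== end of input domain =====

-- B replaces A's event-by-event tallying of two parallel dicts by three staged passes: an
-- ordered dedup fixing the key order, a length-major sliding-window tally into ONE counter,
-- and closed-form savings (count-1)*(len-1); alternative decomposition, same cost.
-- Return-value equivalence only (neither version mutates its arguments).

-- ===== PORT A =====
-- 'ahorros[oc] += ahorro' on a key A just checked is present is ported as insert of (getD + ahorro)
-- (exact: the key is in ocurrencias, and A keeps the two dicts' key sets identical).
def cuenta_ocurrencias (cadenas : List String) (minAbrev : Int) (maxAbrev : Int) : (List (String × Int)) × (List (String × Int)) :=
  let st := cadenas.foldl (fun (st : PySem.Dict String Int × PySem.Dict String Int) cadena =>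
    let longCadena : Int := PySem.Str.len cadena
    if longCadena < minAbrev then st
    else
      (PySem.List.pyRange 0 (longCadena - minAbrev + 1)).foldl (fun st pos =>
        (PySem.List.pyRange minAbrev (min maxAbrev (longCadena - pos) + 1)).foldl (fun st longAbrev =>
          let ahorro := longAbrev - 1
          let ocurrencia := PySem.Str.slice cadena (some pos) (some (pos + longAbrev))
          if st.2.contains ocurrencia then
            (st.1.insert ocurrencia (st.1.getD ocurrencia 0 + ahorro),
             st.2.insert ocurrencia (st.2.getD ocurrencia 0 + 1))
          else
            (st.1.insert ocurrencia 0, st.2.insert ocurrencia 1)) st) st)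
    (PySem.Dict.empty, PySem.Dict.empty)
  (st.1.items, st.2.items)

-- ===== PORT B =====
-- Source B's flat generator of substrings (pos-major, length-minor), fed to dict.fromkeys
def subcadenas (cadena : String) (minAbrev : Int) (maxAbrev : Int) : List String :=
  let n : Int := PySem.Str.len cadena
  (PySem.List.pyRange 0 (n - minAbrev + 1)).flatMap (fun pos =>
    (PySem.List.pyRange minAbrev (min maxAbrev (n - pos) + 1)).map (fun lng =>
      PySem.Str.slice cadena (some pos) (some (pos + lng))))

def cuenta_ocurrencias_alt (cadenas : List String) (minAbrev : Int) (maxAbrev : Int) : (List (String × Int)) × (List (String × Int)) :=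
  let orden := PySem.List.dedup (cadenas.flatMap (fun cadena => subcadenas cadena minAbrev maxAbrev))
  let tope := min maxAbrev (PySem.List.maxD (cadenas.map PySem.Str.len) (fun y => y) 0)
  let cuentas := (PySem.List.pyRange minAbrev (tope + 1)).foldl (fun cu lng =>
    cadenas.foldl (fun cu cadena =>
      (PySem.List.pyRange 0 (PySem.Str.len cadena - lng + 1)).foldl (fun (cu : PySem.Dict String Int) pos =>
        let s := PySem.Str.slice cadena (some pos) (some (pos + lng))
        cu.insert s (cu.getD s 0 + 1)) cu) cu) PySem.Dict.empty
  let ahorros := orden.foldl (fun (d : PySem.Dict String Int) s =>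
    d.insert s ((cuentas.getD s 0 - 1) * (PySem.Str.len s - 1))) PySem.Dict.empty
  let ocurrencias := orden.foldl (fun (d : PySem.Dict String Int) s =>
    d.insert s (cuentas.getD s 0)) PySem.Dict.empty
  (ahorros.items, ocurrencias.items)

-- ===== PRECONDITION & SPEC =====
-- Pre_ excludes negative minAbrev (an abbreviation length is positive in this task's domain):
-- there A tallies empty-string "occurrences" whose per-event savings differ from each other,
-- an artefact of A's event-by-event accumulation that B's closed form does not reproduce.
def Pre_cuenta_ocurrencias (cadenas : List String) (minAbrev : Int) (maxAbrev : Int) : Prop := 0 ≤ minAbrev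
instance (cadenas : List String) (minAbrev : Int) (maxAbrev : Int) : Decidable (Pre_cuenta_ocurrencias cadenas minAbrev maxAbrev) := by unfold Pre_cuenta_ocurrencias; infer_instance
def pvWitness_cuenta_ocurrencias : List String × Int × Int := (["abcab", "bca"], 2, 3)

def Spec_cuenta_ocurrencias (cadenas : List String) (minAbrev : Int) (maxAbrev : Int) (out : (List (String × Int)) × (List (String × Int))) : Prop := out = cuenta_ocurrencias_alt cadenas minAbrev maxAbrev
instance (cadenas : List String) (minAbrev : Int) (maxAbrev : Int) (out : (List (String × Int)) × (List (String × Int))) : Decidable (Spec_cuenta_ocurrencias cadenas minAbrev maxAbrev out) := by unfold Spec_cuenta_ocurrencias; infer_instance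

-- ===== CLAIM (what is proved, stated in full; the proofs are below) =====
def Claim_equal_cuenta_ocurrencias : Prop := ∀ (cadenas : List String) (minAbrev : Int) (maxAbrev : Int), Dom_cuenta_ocurrencias cadenas minAbrev maxAbrev → Pre_cuenta_ocurrencias cadenas minAbrev maxAbrev → Spec_cuenta_ocurrencias cadenas minAbrev maxAbrev (cuenta_ocurrencias cadenas minAbrev maxAbrev)

-- ===== LEMMAS AND PROOFS =====

-- A's per-event step (the innermost loop body of port A)
def stepA (st : PySem.Dict String Int × PySem.Dict String Int) (e : String × Int) :
    PySem.Dict String Int × PySem.Dict String Int :=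
  if st.2.contains e.1 then
    (st.1.insert e.1 (st.1.getD e.1 0 + e.2), st.2.insert e.1 (st.2.getD e.1 0 + 1))
  else
    (st.1.insert e.1 0, st.2.insert e.1 1)

-- the counting step both ports perform (after reshaping)
def cstep (d : PySem.Dict String Int) (k : String) : PySem.Dict String Int :=
  d.insert k (d.getD k 0 + 1)

-- A's event list for one string: (substring, saving) pairs in A's traversal order
def eventos (cadena : String) (minAbrev : Int) (maxAbrev : Int) : List (String × Int) :=
  (PySem.List.pyRange 0 (PySem.Str.len cadena - minAbrev + 1)).flatMap (fun pos =>
    (PySem.List.pyRange minAbrev (min maxAbrev (PySem.Str.len cadena - pos) + 1)).map (fun lng =>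
      (PySem.Str.slice cadena (some pos) (some (pos + lng)), lng - 1)))

-- the per-key savings value as a function of the key's count
def ahorroDe (k : String) (c : Int) : Int := (c - 1) * (PySem.Str.len k - 1)

-- dict whose items are a counter's items with values mapped through ahorroDe
def projC (d : PySem.Dict String Int) : PySem.Dict String Int :=
  PySem.Dict.mk (d.items.map (fun p => (p.1, ahorroDe p.1 p.2)))

theorem keys_projC (d : PySem.Dict String Int) : (projC d).keys = d.keys := by
  cases d with
  | mk l => simp [projC, List.map_map, Function.comp_def]

theorem contains_projC (d : PySem.Dict String Int) (k : String) :
    (projC d).contains k = d.contains k := by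
  rw [PySem.Dict.contains_eq_decide_mem_keys, PySem.Dict.contains_eq_decide_mem_keys, keys_projC]

theorem get?_projC (d : PySem.Dict String Int) (k : String) :
    (projC d).get? k = (d.get? k).map (ahorroDe k) := by
  cases d with
  | mk l =>
    induction l with
    | nil => rfl
    | cons p rest ih =>
      show (PySem.Dict.mk (((p :: rest).map (fun p => (p.1, ahorroDe p.1 p.2))))).get? k = _
      rw [List.map_cons, PySem.Dict.get?_mk_cons, PySem.Dict.get?_mk_cons]
      by_cases h : p.1 == k
      · have hk : p.1 = k := by simpa using h
        subst hk
        simp [h]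
      · simp only [h, Bool.false_eq_true, ite_false]
        exact ih

theorem insert_projC (d : PySem.Dict String Int) (k : String) (v : Int) :
    (projC d).insert k (ahorroDe k v) = projC (d.insert k v) := by
  apply PySem.Dict.ext
  by_cases h : d.contains k = true
  · rw [show (projC (d.insert k v)).items = (d.insert k v).items.map (fun p => (p.1, ahorroDe p.1 p.2)) from rfl,
        PySem.Dict.items_insert_of_contains _ _ h,
        PySem.Dict.items_insert_of_contains _ _ (by rw [contains_projC]; exact h)]
    rw [show (projC d).items = d.items.map (fun p => (p.1, ahorroDe p.1 p.2)) from rfl]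
    rw [List.map_map, List.map_map]
    apply List.map_congr_left
    intro p _
    by_cases hp : p.1 = k
    · simp [hp]
    · simp [hp]
  · have hF : d.contains k = false := by simpa using h
    have hF' : (projC d).contains k = false := by rw [contains_projC]; exact hF
    rw [show (projC (d.insert k v)).items = (d.insert k v).items.map (fun p => (p.1, ahorroDe p.1 p.2)) from rfl,
        PySem.Dict.items_insert_of_not_contains _ _ hF,
        PySem.Dict.items_insert_of_not_contains _ _ hF']
    simp [projC]

-- one A-event on (projC d, d) is one counting step on d, when the saving is len-1
theorem step_projC (d : PySem.Dict String Int) (e : String × Int)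
    (he : e.2 = PySem.Str.len e.1 - 1) :
    stepA (projC d, d) e = (projC (cstep d e.1), cstep d e.1) := by
  rw [show stepA (projC d, d) e
      = (if d.contains e.1 then
          ((projC d).insert e.1 ((projC d).getD e.1 0 + e.2), d.insert e.1 (d.getD e.1 0 + 1))
        else ((projC d).insert e.1 0, d.insert e.1 1)) from rfl,
      show cstep d e.1 = d.insert e.1 (d.getD e.1 0 + 1) from rfl]
  by_cases h : d.contains e.1 = true
  · obtain ⟨c, hc⟩ : ∃ c, d.get? e.1 = some c := by
      rcases hq : d.get? e.1 with _ | c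
      · rw [PySem.Dict.get?_eq_none_iff_contains] at hq; rw [h] at hq; cases hq
      · exact ⟨c, rfl⟩
    have hA : (projC d).getD e.1 0 = ahorroDe e.1 c := by
      rw [PySem.Dict.getD_eq_get?_getD, get?_projC, hc]; rfl
    have hO : d.getD e.1 0 = c := by rw [PySem.Dict.getD_eq_get?_getD, hc]; rfl
    rw [if_pos h, hA, hO, he]
    have hv : ahorroDe e.1 c + (PySem.Str.len e.1 - 1) = ahorroDe e.1 (c + 1) := by
      simp only [ahorroDe]; ring
    rw [hv, insert_projC]
  · have hF : d.contains e.1 = false := by simpa using h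
    have hO : d.getD e.1 0 = 0 := by
      rw [PySem.Dict.getD_eq_get?_getD, (PySem.Dict.get?_eq_none_iff_contains d e.1).2 hF]; rfl
    rw [if_neg (by simp [hF]), hO]
    have hz : (0 : Int) = ahorroDe e.1 1 := by simp [ahorroDe]
    rw [show (0 : Int) + 1 = 1 from by ring, hz, insert_projC]

theorem fold_projC (l : List (String × Int)) (d : PySem.Dict String Int)
    (hl : ∀ e ∈ l, e.2 = PySem.Str.len e.1 - 1) :
    l.foldl stepA (projC d, d) = (projC ((l.map Prod.fst).foldl cstep d), (l.map Prod.fst).foldl cstep d) := by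
  induction l generalizing d with
  | nil => rfl
  | cons e rest ih =>
    rw [List.foldl_cons, List.map_cons, List.foldl_cons,
        step_projC d e (hl e (by simp))]
    exact ih _ (fun x hx => hl x (by simp [hx]))

-- A's per-cadena body is the fold of stepA over that string's event list
theorem A_body_eq (cadena : String) (minAbrev maxAbrev : Int)
    (st : PySem.Dict String Int × PySem.Dict String Int) :
    (let longCadena : Int := PySem.Str.len cadena
     if longCadena < minAbrev then st
     else
      (PySem.List.pyRange 0 (longCadena - minAbrev + 1)).foldl (fun st pos =>
        (PySem.List.pyRange minAbrev (min maxAbrev (longCadena - pos) + 1)).foldl (fun st longAbrev =>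
          stepA st (PySem.Str.slice cadena (some pos) (some (pos + longAbrev)), longAbrev - 1)) st) st)
    = (eventos cadena minAbrev maxAbrev).foldl stepA st := by
  show (if PySem.Str.len cadena < minAbrev then st else _) = _
  by_cases h : PySem.Str.len cadena < minAbrev
  · rw [if_pos h, eventos, PySem.List.pyRange_one_eq_nil (by omega)]
    rfl
  · rw [if_neg h, eventos, List.foldl_flatMap]
    apply PySem.List.foldl_congr_mem
    intro acc pos _
    rw [List.foldl_map]

-- every event saving in range is the substring's length minus one (needs 0 ≤ minAbrev)
theorem eventos_saving (cadena : String) (minAbrev maxAbrev : Int) (hmin : 0 ≤ minAbrev) :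
    ∀ e ∈ eventos cadena minAbrev maxAbrev, e.2 = PySem.Str.len e.1 - 1 := by
  intro e he
  rw [eventos, List.mem_flatMap] at he
  obtain ⟨pos, hpos, he⟩ := he
  rw [List.mem_map] at he
  obtain ⟨lng, hlng, rfl⟩ := he
  rw [PySem.List.mem_pyRange_one] at hpos hlng
  have h1 : 0 ≤ pos := hpos.1
  have h2 : 0 ≤ lng := le_trans hmin hlng.1
  have h3 : pos + lng ≤ PySem.Str.len cadena := by omega
  show lng - 1 = PySem.Str.len (PySem.Str.slice cadena (some pos) (some (pos + lng))) - 1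
  have hlen : PySem.Str.len (PySem.Str.slice cadena (some pos) (some (pos + lng))) = lng := by
    obtain ⟨p, rfl⟩ : ∃ p : ℕ, pos = (p : Int) := ⟨pos.toNat, by omega⟩
    obtain ⟨l, rfl⟩ : ∃ l : ℕ, lng = (l : Int) := ⟨lng.toNat, by omega⟩
    rw [PySem.Str.len_eq] at h3 ⊢
    rw [PySem.Str.toList_slice,
        show PySem.Chars.slice cadena.toList (some (p : Int)) (some ((p : Int) + (l : Int)))
          = PySem.List.slice cadena.toList (some (p : Int)) (some ((p : Int) + (l : Int))) from rfl,
        PySem.List.slice_natCast_add, List.length_take, List.length_drop]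
    omega
  omega

-- ---- counting: A's key stream (pos-major) and B's (length-major) agree countwise ----

def clavesA (cadenas : List String) (minAbrev maxAbrev : Int) : List String :=
  cadenas.flatMap (fun cadena => subcadenas cadena minAbrev maxAbrev)

def clavesB (cadenas : List String) (minAbrev maxAbrev : Int) : List String :=
  (PySem.List.pyRange minAbrev (min maxAbrev (PySem.List.maxD (cadenas.map PySem.Str.len) (fun y => y) 0) + 1)).flatMap (fun lng =>
    cadenas.flatMap (fun cadena =>
      (PySem.List.pyRange 0 (PySem.Str.len cadena - lng + 1)).map (fun pos =>
        PySem.Str.slice cadena (some pos) (some (pos + lng)))))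

theorem sum_map_pyRange (f : Int → ℕ) (a b : Int) :
    ((PySem.List.pyRange a b).map f).sum = ∑ i ∈ Finset.Icc a (b - 1), f i := by
  by_cases h : b ≤ a
  · rw [PySem.List.pyRange_one_eq_nil h, Finset.Icc_eq_empty (by omega)]
    simp
  · have hb : b = (b - 1) + 1 := by ring
    rw [hb, PySem.List.pyRange_one_succ_right (by omega)]
    have hins : Finset.Icc a (b - 1 + 1 - 1) = insert (b - 1) (Finset.Icc a (b - 1 - 1)) := by
      apply Finset.ext
      intro x
      simp only [Finset.mem_Icc, Finset.mem_insert]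
      omega
    rw [hins, Finset.sum_insert (by simp [Finset.mem_Icc])]
    rw [List.map_append, List.sum_append, sum_map_pyRange f a (b - 1)]
    simp [Nat.add_comm]
termination_by (b - a).toNat
decreasing_by omega

theorem count_map_eq_sum {α : Type} (s : String) (l : List α) (f : α → String) :
    ((l.map f).count s) = (l.map (fun x => if f x == s then 1 else 0)).sum := by
  induction l with
  | nil => rfl
  | cons x t ih =>
    rw [List.map_cons, List.count_cons, List.map_cons, List.sum_cons, ih]
    by_cases h : f x == s
    · simp [h, Nat.add_comm]
    · simp [h]

-- swapping a Finset sum with a list-indexed sum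
theorem sum_swap_list {α : Type} (l : List α) (S : Finset Int) (f : α → Int → ℕ) :
    ∑ i ∈ S, (l.map (fun c => f c i)).sum = (l.map (fun c => ∑ i ∈ S, f c i)).sum := by
  induction l with
  | nil => simp
  | cons c t ih =>
    simp only [List.map_cons, List.sum_cons, Finset.sum_add_distrib, ih]

-- the triangular swap at the heart of the equivalence: per string, summing windows
-- pos-major with per-position length caps equals summing length-major with a global cap
theorem triangular_swap (n ma T : Int) (hT : n ≤ T) (F : Int → Int → ℕ) (mi : Int) :
    ∑ pos ∈ Finset.Icc 0 (n - mi), ∑ lng ∈ Finset.Icc mi (min ma (n - pos)), F pos lng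
    = ∑ lng ∈ Finset.Icc mi (min ma T), ∑ pos ∈ Finset.Icc 0 (n - lng), F pos lng := by
  rw [Finset.sum_sigma' (Finset.Icc 0 (n - mi)) (fun pos => Finset.Icc mi (min ma (n - pos))) (fun pos lng => F pos lng),
      Finset.sum_sigma' (Finset.Icc mi (min ma T)) (fun lng => Finset.Icc 0 (n - lng)) (fun lng pos => F pos lng)]
  refine Finset.sum_nbij' (fun q => ⟨q.2, q.1⟩) (fun q => ⟨q.2, q.1⟩) ?_ ?_ ?_ ?_ ?_
  · intro q hq
    simp only [Finset.mem_sigma, Finset.mem_Icc, le_min_iff, min_le_iff] at hq ⊢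
    rcases hq with ⟨⟨h1, h2⟩, h3, h4, h5⟩
    refine ⟨⟨h3, h4, ?_⟩, h1, by omega⟩
    omega
  · intro q hq
    simp only [Finset.mem_sigma, Finset.mem_Icc, le_min_iff, min_le_iff] at hq ⊢
    rcases hq with ⟨⟨h1, h2, h3⟩, h4, h5⟩
    exact ⟨⟨h4, by omega⟩, h1, h2, by omega⟩
  · intro q _; rfl
  · intro q _; rfl
  · intro q _; rfl

-- every string's length is bounded by the maxD over the mapped lengths
theorem len_le_maxD (cadenas : List String) (c : String) (hc : c ∈ cadenas) :
    PySem.Str.len c ≤ PySem.List.maxD (cadenas.map PySem.Str.len) (fun y => y) 0 := by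
  have hmem : PySem.Str.len c ∈ cadenas.map PySem.Str.len := List.mem_map_of_mem hc
  rcases hm : cadenas.map PySem.Str.len with _ | ⟨x, t⟩
  · rw [hm] at hmem; cases hmem
  · rw [hm] at hmem
    rw [PySem.List.maxD_id_cons]
    rcases List.mem_cons.1 hmem with h | h
    · rw [h]; exact (PySem.List.le_foldl_max t x).1
    · exact (PySem.List.le_foldl_max t x).2 _ h

-- counts agree between the two key streams for every key (needs 0 ≤ minAbrev only
-- nowhere: the range swap is unconditional)
theorem counts_eq (cadenas : List String) (minAbrev maxAbrev : Int) (s : String) :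
    (clavesA cadenas minAbrev maxAbrev).count s = (clavesB cadenas minAbrev maxAbrev).count s := by
  have hcntRange : ∀ (a b : Int) (f : Int → String),
      ((PySem.List.pyRange a b).map f).count s
        = ∑ i ∈ Finset.Icc a (b - 1), (if f i == s then 1 else 0) := by
    intro a b f
    rw [count_map_eq_sum, sum_map_pyRange]
  -- per-string, pos-major count
  have hA1 : ∀ c : String, (subcadenas c minAbrev maxAbrev).count s
      = ∑ pos ∈ Finset.Icc 0 (PySem.Str.len c - minAbrev),
          ∑ lng ∈ Finset.Icc minAbrev (min maxAbrev (PySem.Str.len c - pos)),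
            (if PySem.Str.slice c (some pos) (some (pos + lng)) == s then 1 else 0) := by
    intro c
    rw [subcadenas, List.count_flatMap]
    have hmap : ((PySem.List.pyRange 0 (PySem.Str.len c - minAbrev + 1)).map
        (List.count s ∘ fun pos => (PySem.List.pyRange minAbrev (min maxAbrev (PySem.Str.len c - pos) + 1)).map (fun lng =>
          PySem.Str.slice c (some pos) (some (pos + lng)))))
        = ((PySem.List.pyRange 0 (PySem.Str.len c - minAbrev + 1)).map
        (fun pos => ∑ lng ∈ Finset.Icc minAbrev (min maxAbrev (PySem.Str.len c - pos)),
          (if PySem.Str.slice c (some pos) (some (pos + lng)) == s then 1 else 0))) := by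
      apply List.map_congr_left
      intro pos _
      show ((PySem.List.pyRange minAbrev (min maxAbrev (PySem.Str.len c - pos) + 1)).map _).count s = _
      rw [hcntRange]
      congr 1
      congr 1
      omega
    rw [hmap, sum_map_pyRange]
    congr 1
    congr 1
    omega
  set T := PySem.List.maxD (cadenas.map PySem.Str.len) (fun y => y) 0 with hTdef
  -- B's count: length-major, global cap
  have hB1 : (clavesB cadenas minAbrev maxAbrev).count s
      = ∑ lng ∈ Finset.Icc minAbrev (min maxAbrev T),
          (cadenas.map (fun c => ∑ pos ∈ Finset.Icc 0 (PySem.Str.len c - lng),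
            (if PySem.Str.slice c (some pos) (some (pos + lng)) == s then 1 else 0))).sum := by
    rw [clavesB, List.count_flatMap]
    have hmap : ((PySem.List.pyRange minAbrev (min maxAbrev T + 1)).map
        (List.count s ∘ fun lng => cadenas.flatMap (fun c =>
          (PySem.List.pyRange 0 (PySem.Str.len c - lng + 1)).map (fun pos =>
            PySem.Str.slice c (some pos) (some (pos + lng))))))
        = ((PySem.List.pyRange minAbrev (min maxAbrev T + 1)).map
        (fun lng => (cadenas.map (fun c => ∑ pos ∈ Finset.Icc 0 (PySem.Str.len c - lng),
            (if PySem.Str.slice c (some pos) (some (pos + lng)) == s then 1 else 0))).sum)) := by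
      apply List.map_congr_left
      intro lng _
      show (cadenas.flatMap _).count s = _
      rw [List.count_flatMap]
      congr 1
      apply List.map_congr_left
      intro c _
      show ((PySem.List.pyRange 0 (PySem.Str.len c - lng + 1)).map _).count s = _
      rw [hcntRange]
      congr 1
      congr 1
      omega
    rw [hmap, sum_map_pyRange]
    congr 1
    congr 1
    omega
  rw [clavesA, List.count_flatMap, hB1, sum_swap_list]
  congr 1
  apply List.map_congr_left
  intro c hc
  show (subcadenas c minAbrev maxAbrev).count s = _
  rw [hA1 c]
  exact triangular_swap (PySem.Str.len c) maxAbrev T (len_le_maxD cadenas c hc)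
    (fun pos lng => if PySem.Str.slice c (some pos) (some (pos + lng)) == s then 1 else 0) minAbrev

-- A's whole output, characterised: savings-projected counter and counter of the key stream
theorem A_characterisation (cadenas : List String) (minAbrev maxAbrev : Int) (hpre : (0:Int) ≤ minAbrev) :
    cuenta_ocurrencias cadenas minAbrev maxAbrev
    = ((projC (PySem.Dict.counter (clavesA cadenas minAbrev maxAbrev))).items,
       (PySem.Dict.counter (clavesA cadenas minAbrev maxAbrev)).items) := by
  show ((cadenas.foldl (fun (st : PySem.Dict String Int × PySem.Dict String Int) cadena =>
      let longCadena : Int := PySem.Str.len cadena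
      if longCadena < minAbrev then st
      else
        (PySem.List.pyRange 0 (longCadena - minAbrev + 1)).foldl (fun st pos =>
          (PySem.List.pyRange minAbrev (min maxAbrev (longCadena - pos) + 1)).foldl (fun st longAbrev =>
            stepA st (PySem.Str.slice cadena (some pos) (some (pos + longAbrev)), longAbrev - 1)) st) st)
        (PySem.Dict.empty, PySem.Dict.empty)).1.items,
      (cadenas.foldl (fun (st : PySem.Dict String Int × PySem.Dict String Int) cadena =>
      let longCadena : Int := PySem.Str.len cadena
      if longCadena < minAbrev then st
      else
        (PySem.List.pyRange 0 (longCadena - minAbrev + 1)).foldl (fun st pos =>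
          (PySem.List.pyRange minAbrev (min maxAbrev (longCadena - pos) + 1)).foldl (fun st longAbrev =>
            stepA st (PySem.Str.slice cadena (some pos) (some (pos + longAbrev)), longAbrev - 1)) st) st)
        (PySem.Dict.empty, PySem.Dict.empty)).2.items) = _
  have hA0 : (cadenas.foldl (fun (st : PySem.Dict String Int × PySem.Dict String Int) cadena =>
      let longCadena : Int := PySem.Str.len cadena
      if longCadena < minAbrev then st
      else
        (PySem.List.pyRange 0 (longCadena - minAbrev + 1)).foldl (fun st pos =>
          (PySem.List.pyRange minAbrev (min maxAbrev (longCadena - pos) + 1)).foldl (fun st longAbrev =>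
            stepA st (PySem.Str.slice cadena (some pos) (some (pos + longAbrev)), longAbrev - 1)) st) st)
        (PySem.Dict.empty, PySem.Dict.empty))
      = (cadenas.flatMap (fun cadena => eventos cadena minAbrev maxAbrev)).foldl stepA
          (PySem.Dict.empty, PySem.Dict.empty) := by
    rw [List.foldl_flatMap]
    apply PySem.List.foldl_congr_mem
    intro st cadena _
    exact A_body_eq cadena minAbrev maxAbrev st
  have hsav : ∀ e ∈ cadenas.flatMap (fun cadena => eventos cadena minAbrev maxAbrev),
      e.2 = PySem.Str.len e.1 - 1 := by
    intro e he
    rw [List.mem_flatMap] at he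
    obtain ⟨cc, _, he⟩ := he
    exact eventos_saving cc minAbrev maxAbrev hpre e he
  have hkeys : (cadenas.flatMap (fun cadena => eventos cadena minAbrev maxAbrev)).map Prod.fst
      = clavesA cadenas minAbrev maxAbrev := by
    rw [clavesA, List.map_flatMap]
    have hfun : (fun c => ((eventos c minAbrev maxAbrev).map Prod.fst))
        = (fun c => subcadenas c minAbrev maxAbrev) := by
      funext cc
      simp [eventos, subcadenas, List.map_flatMap, List.map_map, Function.comp_def]
    exact congrArg (cadenas.flatMap ·) hfun
  have hcc : List.foldl cstep PySem.Dict.empty (clavesA cadenas minAbrev maxAbrev)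
      = PySem.Dict.counter (clavesA cadenas minAbrev maxAbrev) :=
    PySem.Dict.foldl_insert_getD_add_one_eq_counter (clavesA cadenas minAbrev maxAbrev)
  rw [hA0,
      show ((PySem.Dict.empty, PySem.Dict.empty) :
        PySem.Dict String Int × PySem.Dict String Int) = (projC PySem.Dict.empty, PySem.Dict.empty) from rfl,
      fold_projC _ _ hsav, hkeys, hcc]

-- B's output, characterised over the same sets and counts
theorem B_characterisation (cadenas : List String) (minAbrev maxAbrev : Int) :
    cuenta_ocurrencias_alt cadenas minAbrev maxAbrev
    = ((PySem.Set.ofList (clavesA cadenas minAbrev maxAbrev)).map (fun s =>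
          (s, ((PySem.Dict.counter (clavesB cadenas minAbrev maxAbrev)).getD s 0 - 1) * (PySem.Str.len s - 1))),
       (PySem.Set.ofList (clavesA cadenas minAbrev maxAbrev)).map (fun s =>
          (s, (PySem.Dict.counter (clavesB cadenas minAbrev maxAbrev)).getD s 0))) := by
  have hBcnt : ((PySem.List.pyRange minAbrev
      (min maxAbrev (PySem.List.maxD (cadenas.map PySem.Str.len) (fun y => y) 0) + 1)).foldl (fun cu lng =>
      cadenas.foldl (fun cu cadena =>
        (PySem.List.pyRange 0 (PySem.Str.len cadena - lng + 1)).foldl (fun (cu : PySem.Dict String Int) pos =>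
          cstep cu (PySem.Str.slice cadena (some pos) (some (pos + lng)))) cu) cu) PySem.Dict.empty)
      = PySem.Dict.counter (clavesB cadenas minAbrev maxAbrev) := by
    have h1 : (clavesB cadenas minAbrev maxAbrev).foldl cstep PySem.Dict.empty
        = PySem.Dict.counter (clavesB cadenas minAbrev maxAbrev) :=
      PySem.Dict.foldl_insert_getD_add_one_eq_counter (clavesB cadenas minAbrev maxAbrev)
    rw [← h1, clavesB, List.foldl_flatMap]
    apply PySem.List.foldl_congr_mem
    intro cu lng _
    rw [List.foldl_flatMap]
    apply PySem.List.foldl_congr_mem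
    intro cu' cadena _
    rw [List.foldl_map]
  show (((PySem.List.dedup (clavesA cadenas minAbrev maxAbrev)).foldl (fun (d : PySem.Dict String Int) s =>
      d.insert s ((((PySem.List.pyRange minAbrev
        (min maxAbrev (PySem.List.maxD (cadenas.map PySem.Str.len) (fun y => y) 0) + 1)).foldl (fun cu lng =>
        cadenas.foldl (fun cu cadena =>
          (PySem.List.pyRange 0 (PySem.Str.len cadena - lng + 1)).foldl (fun (cu : PySem.Dict String Int) pos =>
            cstep cu (PySem.Str.slice cadena (some pos) (some (pos + lng)))) cu) cu) PySem.Dict.empty).getD s 0 - 1)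
          * (PySem.Str.len s - 1))) PySem.Dict.empty).items,
    ((PySem.List.dedup (clavesA cadenas minAbrev maxAbrev)).foldl (fun (d : PySem.Dict String Int) s =>
      d.insert s (((PySem.List.pyRange minAbrev
        (min maxAbrev (PySem.List.maxD (cadenas.map PySem.Str.len) (fun y => y) 0) + 1)).foldl (fun cu lng =>
        cadenas.foldl (fun cu cadena =>
          (PySem.List.pyRange 0 (PySem.Str.len cadena - lng + 1)).foldl (fun (cu : PySem.Dict String Int) pos =>
            cstep cu (PySem.Str.slice cadena (some pos) (some (pos + lng)))) cu) cu) PySem.Dict.empty).getD s 0))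
      PySem.Dict.empty).items) = _
  rw [hBcnt, PySem.List.dedup_eq_ofList]
  have hnd : ((PySem.Set.ofList (clavesA cadenas minAbrev maxAbrev)).map (fun s => s)).Nodup := by
    simpa using PySem.Set.nodup_ofList (clavesA cadenas minAbrev maxAbrev)
  rw [PySem.Dict.items_foldl_insert_fresh (PySem.Set.ofList (clavesA cadenas minAbrev maxAbrev))
        (fun s => s)
        (fun s => ((PySem.Dict.counter (clavesB cadenas minAbrev maxAbrev)).getD s 0 - 1) * (PySem.Str.len s - 1))
        PySem.Dict.empty (fun a _ => by simp) hnd,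
      PySem.Dict.items_foldl_insert_fresh (PySem.Set.ofList (clavesA cadenas minAbrev maxAbrev))
        (fun s => s)
        (fun s => (PySem.Dict.counter (clavesB cadenas minAbrev maxAbrev)).getD s 0)
        PySem.Dict.empty (fun a _ => by simp) hnd]
  rfl

-- ===== VERDICT (by name: the statement is the Claim_ definition above) =====
theorem cuenta_ocurrencias_spec : Claim_equal_cuenta_ocurrencias := by
  intro cadenas minAbrev maxAbrev _ hpre
  show cuenta_ocurrencias cadenas minAbrev maxAbrev = cuenta_ocurrencias_alt cadenas minAbrev maxAbrev
  rw [A_characterisation cadenas minAbrev maxAbrev hpre, B_characterisation cadenas minAbrev maxAbrev]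
  have hgetD : ∀ k : String,
      (PySem.Dict.counter (clavesB cadenas minAbrev maxAbrev)).getD k 0
        = ((clavesA cadenas minAbrev maxAbrev).count k : Int) := by
    intro k
    rw [PySem.Dict.getD_counter, ← counts_eq]
  rw [show (projC (PySem.Dict.counter (clavesA cadenas minAbrev maxAbrev))).items
        = (PySem.Dict.counter (clavesA cadenas minAbrev maxAbrev)).items.map
            (fun p => (p.1, ahorroDe p.1 p.2)) from rfl,
      PySem.Dict.items_counter (clavesA cadenas minAbrev maxAbrev), List.map_map]
  refine Prod.ext ?_ ?_
  · apply List.map_congr_left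
    intro k _
    simp only [Function.comp_def, ahorroDe, hgetD k]
  · apply List.map_congr_left
    intro k _
    simp only [hgetD k]
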